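-- pv_equiv track=rewrite | github.com/Promastergame/Qyra-AI | qyre/fix_data.py | clean_conversation
-- ===== SOURCE A (Python) =====
-- SYSTEM_QYRA = "You are Qyra, a helpful and friendly AI assistant."
--
-- def clean_conversation(messages):
--     """Убираем tool_call и tool_result, оставляем только диалог."""
--     cleaned = []
--
--     # Добавляем системное сообщение с именем Qyra
--     cleaned.append({
--         "role": "system",
--         "content": SYSTEM_QYRA
--     })
--
--     skip_until_assistant = False
--
--     for msg in messages:
--         role = msg.get("role", "")
--         content = msg.get("content", "")
--
--         # Пропускаем инструменты
--         if role in ("tool_call", "tool_result"):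
--             skip_until_assistant = True
--             continue
--
--         # Пропускаем ассистента сразу после tool_result (он обычно про результат)
--         if skip_until_assistant and role == "assistant":
--             # Но если это не про инструмент — оставляем
--             if "result" not in content.lower() and "calculate" not in content.lower():
--                 cleaned.append({"role": role, "content": content})
--             skip_until_assistant = False
--             continue
--
--         # Оставляем system, user, assistant
--         if role in ("system", "user", "assistant"):
--             # Не дублируем system
--             if role == "system" and len(cleaned) > 0:
--                 continue
--             cleaned.append({"role": role, "content": content})
--
--     # Убираем дубликаты подряд идущих сообщений одной роли
--     deduped = []
--     prev_role = None
--     for msg in cleaned: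
--         if msg["role"] != prev_role:
--             deduped.append(msg)
--             prev_role = msg["role"]
--
--     return deduped
-- ===== SOURCE B (Python) =====
-- SYSTEM_QYRA = "You are Qyra, a helpful and friendly AI assistant."
--
-- def clean_conversation(messages):
--     """Single fused pass: filter tool traffic and drop consecutive same-role messages on the fly."""
--     out = [{"role": "system", "content": SYSTEM_QYRA}]
--     last_role = "system"
--     skip_until_assistant = False
--     for msg in messages:
--         role = msg.get("role", "")
--         if role in ("tool_call", "tool_result"):
--             skip_until_assistant = True
--             continue
--         if skip_until_assistant and role == "assistant":
--             skip_until_assistant = False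
--             lc = msg.get("content", "").lower()
--             keep = "result" not in lc and "calculate" not in lc
--         elif role in ("user", "assistant"):
--             keep = True
--         else:
--             keep = False
--         if keep and role != last_role:
--             out.append({"role": role, "content": msg.get("content", "")})
--             last_role = role
--     return out
-- ===== Notes on version B (the rewrite author's own statement) =====
-- stated objective: simpler
-- what changed: Fused A's two passes (build cleaned list, then dedup consecutive roles) into one loop that tracks the last appended role and decides keep/drop per message, so no intermediate list or second scan exists.
import Mathlib
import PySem

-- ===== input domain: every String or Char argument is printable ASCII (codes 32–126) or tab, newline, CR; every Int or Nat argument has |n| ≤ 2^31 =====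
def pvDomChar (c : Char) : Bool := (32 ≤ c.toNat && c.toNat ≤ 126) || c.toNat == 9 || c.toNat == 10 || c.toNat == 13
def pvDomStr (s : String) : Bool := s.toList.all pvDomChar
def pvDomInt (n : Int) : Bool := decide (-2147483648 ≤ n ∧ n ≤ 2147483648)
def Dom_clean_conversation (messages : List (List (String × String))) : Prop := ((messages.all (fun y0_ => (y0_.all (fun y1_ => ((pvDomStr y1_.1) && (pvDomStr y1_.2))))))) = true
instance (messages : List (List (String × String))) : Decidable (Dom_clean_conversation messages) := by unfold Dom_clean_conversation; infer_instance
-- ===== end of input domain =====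

-- B fuses A's two passes (filter, then dedup of consecutive roles) into one loop tracking the
-- last-appended role; same return value on every input, objective: simpler (no intermediate list).

def SYSTEM_QYRA : String := "You are Qyra, a helpful and friendly AI assistant."

-- ===== PORT A =====
-- A's first loop: filter tool traffic, building `cleaned` (accumulator) with the skip flag.
def pvCleanLoopA : List (List (String × String)) → List (List (String × String)) → Bool → List (List (String × String))
  | [], cleaned, _ => cleaned
  | msg :: rest, cleaned, skip =>
    let role := (PySem.Dict.mk msg).getD "role" ""
    let content := (PySem.Dict.mk msg).getD "content" ""
    if role = "tool_call" ∨ role = "tool_result" then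
      pvCleanLoopA rest cleaned true
    else if skip = true ∧ role = "assistant" then
      if ¬ PySem.Str.isIn "result" (PySem.Str.lower content) = true ∧
         ¬ PySem.Str.isIn "calculate" (PySem.Str.lower content) = true then
        pvCleanLoopA rest (cleaned ++ [[("role", role), ("content", content)]]) false
      else
        pvCleanLoopA rest cleaned false
    else if role = "system" ∨ role = "user" ∨ role = "assistant" then
      if role = "system" ∧ cleaned.length > 0 then
        pvCleanLoopA rest cleaned skip
      else
        pvCleanLoopA rest (cleaned ++ [[("role", role), ("content", content)]]) skip
    else
      pvCleanLoopA rest cleaned skip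

-- A's second loop: drop consecutive messages of one role (msg["role"]: the key is always present
-- in the messages A itself built, so getD is exact here).
def pvDedupLoopA : List (List (String × String)) → List (List (String × String)) → Option String → List (List (String × String))
  | [], deduped, _ => deduped
  | msg :: rest, deduped, prev =>
    let r := (PySem.Dict.mk msg).getD "role" ""
    if some r ≠ prev then
      pvDedupLoopA rest (deduped ++ [msg]) (some r)
    else
      pvDedupLoopA rest deduped prev

def clean_conversation (messages : List (List (String × String))) : List (List (String × String)) :=
  pvDedupLoopA (pvCleanLoopA messages [[("role", "system"), ("content", SYSTEM_QYRA)]] false) [] none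

-- ===== PORT B =====
-- B's single fused loop: keep/skip decision and on-the-fly dedup against the last appended role.
def pvFuseLoopB : List (List (String × String)) → List (List (String × String)) → String → Bool → List (List (String × String))
  | [], out, _, _ => out
  | msg :: rest, out, lastRole, skip =>
    let role := (PySem.Dict.mk msg).getD "role" ""
    if role = "tool_call" ∨ role = "tool_result" then
      pvFuseLoopB rest out lastRole true
    else
      let ks : Bool × Bool :=
        if skip = true ∧ role = "assistant" then
          let lc := PySem.Str.lower ((PySem.Dict.mk msg).getD "content" "")
          (!(PySem.Str.isIn "result" lc) && !(PySem.Str.isIn "calculate" lc), false)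
        else if role = "user" ∨ role = "assistant" then (true, skip)
        else (false, skip)
      if ks.1 = true ∧ role ≠ lastRole then
        pvFuseLoopB rest (out ++ [[("role", role), ("content", (PySem.Dict.mk msg).getD "content" "")]]) role ks.2
      else
        pvFuseLoopB rest out lastRole ks.2

def clean_conversation_alt (messages : List (List (String × String))) : List (List (String × String)) :=
  pvFuseLoopB messages [[("role", "system"), ("content", SYSTEM_QYRA)]] "system" false

-- ===== PRECONDITION & SPEC =====
def Spec_clean_conversation (messages : List (List (String × String))) (out : List (List (String × String))) : Prop := out = clean_conversation_alt messages
instance (messages : List (List (String × String))) (out : List (List (String × String))) : Decidable (Spec_clean_conversation messages out) := by unfold Spec_clean_conversation; infer_instance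

-- ===== CLAIM (what is proved, stated in full; the proofs are below) =====
def Claim_equal_clean_conversation : Prop := ∀ (messages : List (List (String × String))), Dom_clean_conversation messages → Spec_clean_conversation messages (clean_conversation messages)

-- ===== LEMMAS AND PROOFS =====

-- The list A's first loop appends after a nonempty accumulator (the system guard then always fires).
def pvDelta : List (List (String × String)) → Bool → List (List (String × String))
  | [], _ => []
  | msg :: rest, skip =>
    let role := (PySem.Dict.mk msg).getD "role" ""
    let content := (PySem.Dict.mk msg).getD "content" ""
    if role = "tool_call" ∨ role = "tool_result" then
      pvDelta rest true
    else if skip = true ∧ role = "assistant" then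
      if ¬ PySem.Str.isIn "result" (PySem.Str.lower content) = true ∧
         ¬ PySem.Str.isIn "calculate" (PySem.Str.lower content) = true then
        [("role", role), ("content", content)] :: pvDelta rest false
      else
        pvDelta rest false
    else if role = "system" ∨ role = "user" ∨ role = "assistant" then
      if role = "system" then pvDelta rest skip
      else [("role", role), ("content", content)] :: pvDelta rest skip
    else
      pvDelta rest skip

theorem pvRoleGetD (r c : String) :
    (PySem.Dict.mk [("role", r), ("content", c)]).getD "role" "" = r := by
  simp [PySem.Dict.getD_eq_get?_getD, PySem.Dict.get?_mk_cons]

theorem pvCleanLoopA_eq_delta (ms : List (List (String × String))) :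
    ∀ (c : List (List (String × String))) (s : Bool), c ≠ [] →
      pvCleanLoopA ms c s = c ++ pvDelta ms s := by
  induction ms with
  | nil => intro c s hc; simp [pvCleanLoopA, pvDelta]
  | cons msg rest ih =>
    intro c s hc
    have hlen : c.length > 0 := List.length_pos_iff.mpr hc
    simp only [pvCleanLoopA, pvDelta]
    by_cases h1 : (PySem.Dict.mk msg).getD "role" "" = "tool_call" ∨ (PySem.Dict.mk msg).getD "role" "" = "tool_result"
    · rw [if_pos h1, if_pos h1, ih _ _ hc]
    · rw [if_neg h1, if_neg h1]
      by_cases h2 : s = true ∧ (PySem.Dict.mk msg).getD "role" "" = "assistant"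
      · rw [if_pos h2, if_pos h2]
        by_cases h3 : ¬ PySem.Str.isIn "result" (PySem.Str.lower ((PySem.Dict.mk msg).getD "content" "")) = true ∧
            ¬ PySem.Str.isIn "calculate" (PySem.Str.lower ((PySem.Dict.mk msg).getD "content" "")) = true
        · rw [if_pos h3, if_pos h3, ih _ _ (by simp)]
          simp
        · rw [if_neg h3, if_neg h3, ih _ _ hc]
      · rw [if_neg h2, if_neg h2]
        by_cases h4 : (PySem.Dict.mk msg).getD "role" "" = "system" ∨ (PySem.Dict.mk msg).getD "role" "" = "user" ∨ (PySem.Dict.mk msg).getD "role" "" = "assistant"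
        · rw [if_pos h4, if_pos h4]
          by_cases h5 : (PySem.Dict.mk msg).getD "role" "" = "system"
          · rw [if_pos ⟨h5, hlen⟩, if_pos h5, ih _ _ hc]
          · rw [if_neg (by intro h; exact h5 h.1), if_neg h5, ih _ _ (by simp)]
            simp
        · rw [if_neg h4, if_neg h4, ih _ _ hc]

theorem pvDedup_delta_eq_fuse (ms : List (List (String × String))) :
    ∀ (d : List (List (String × String))) (last : String) (s : Bool),
      pvDedupLoopA (pvDelta ms s) d (some last) = pvFuseLoopB ms d last s := by
  induction ms with
  | nil => intro d last s; simp [pvDelta, pvDedupLoopA, pvFuseLoopB]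
  | cons msg rest ih =>
    intro d last s
    simp only [pvDelta, pvFuseLoopB]
    by_cases h1 : (PySem.Dict.mk msg).getD "role" "" = "tool_call" ∨ (PySem.Dict.mk msg).getD "role" "" = "tool_result"
    · rw [if_pos h1, if_pos h1]
      exact ih d last true
    · rw [if_neg h1, if_neg h1]
      by_cases h2 : s = true ∧ (PySem.Dict.mk msg).getD "role" "" = "assistant"
      · rw [if_pos h2, if_pos h2]
        by_cases h3 : ¬ PySem.Str.isIn "result" (PySem.Str.lower ((PySem.Dict.mk msg).getD "content" "")) = true ∧
            ¬ PySem.Str.isIn "calculate" (PySem.Str.lower ((PySem.Dict.mk msg).getD "content" "")) = true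
        · rw [if_pos h3]
          have hb : (!(PySem.Str.isIn "result" (PySem.Str.lower ((PySem.Dict.mk msg).getD "content" ""))) &&
              !(PySem.Str.isIn "calculate" (PySem.Str.lower ((PySem.Dict.mk msg).getD "content" "")))) = true := by
            simp only [Bool.and_eq_true, Bool.not_eq_true']
            exact ⟨Bool.not_eq_true _ ▸ h3.1, Bool.not_eq_true _ ▸ h3.2⟩
          simp only [pvDedupLoopA, pvRoleGetD]
          by_cases hr : (PySem.Dict.mk msg).getD "role" "" = last
          · rw [if_neg (by simp [hr]), if_neg (by intro h; exact h.2 hr)]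
            exact ih d last false
          · rw [if_pos (by simp [hr]), if_pos ⟨hb, hr⟩]
            exact ih _ _ false
        · rw [if_neg h3]
          have hb : ¬ ((!(PySem.Str.isIn "result" (PySem.Str.lower ((PySem.Dict.mk msg).getD "content" ""))) &&
              !(PySem.Str.isIn "calculate" (PySem.Str.lower ((PySem.Dict.mk msg).getD "content" "")))) = true ∧
              (PySem.Dict.mk msg).getD "role" "" ≠ last) := by
            intro h
            apply h3
            have := h.1
            simp only [Bool.and_eq_true, Bool.not_eq_true'] at this
            exact ⟨by rw [this.1]; simp, by rw [this.2]; simp⟩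
          rw [if_neg hb]
          exact ih d last false
      · rw [if_neg h2, if_neg h2]
        by_cases h4 : (PySem.Dict.mk msg).getD "role" "" = "system" ∨ (PySem.Dict.mk msg).getD "role" "" = "user" ∨ (PySem.Dict.mk msg).getD "role" "" = "assistant"
        · rw [if_pos h4]
          by_cases h5 : (PySem.Dict.mk msg).getD "role" "" = "system"
          · have hu : ¬ ((PySem.Dict.mk msg).getD "role" "" = "user" ∨ (PySem.Dict.mk msg).getD "role" "" = "assistant") := by
              rw [h5]; decide
            rw [if_pos h5, if_neg hu]
            rw [show ((false, s) : Bool × Bool).1 = false from rfl] at *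
            rw [if_neg (by intro h; exact Bool.false_ne_true h.1)]
            exact ih d last s
          · have hu : (PySem.Dict.mk msg).getD "role" "" = "user" ∨ (PySem.Dict.mk msg).getD "role" "" = "assistant" := by
              rcases h4 with h | h | h
              · exact absurd h h5
              · exact Or.inl h
              · exact Or.inr h
            rw [if_neg h5, if_pos hu]
            simp only [pvDedupLoopA, pvRoleGetD]
            by_cases hr : (PySem.Dict.mk msg).getD "role" "" = last
            · rw [if_neg (by simp [hr]), if_neg (by intro h; exact h.2 hr)]
              exact ih d last s
            · rw [if_pos (by simp [hr]), if_pos (by exact ⟨by trivial, hr⟩)]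
              exact ih _ _ s
        · rw [if_neg h4]
          have hu : ¬ ((PySem.Dict.mk msg).getD "role" "" = "user" ∨ (PySem.Dict.mk msg).getD "role" "" = "assistant") := by
            intro h; exact h4 (h.imp_left (fun _ => by tauto) |>.elim (fun h => Or.inr (Or.inl h)) (fun h => Or.inr (Or.inr h)))
          rw [if_neg hu, if_neg (by intro h; exact Bool.false_ne_true h.1)]
          exact ih d last s

-- ===== VERDICT (by name: the statement is the Claim_ definition above) =====
theorem clean_conversation_spec : Claim_equal_clean_conversation := by
  intro messages _
  show clean_conversation messages = clean_conversation_alt messages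
  unfold clean_conversation clean_conversation_alt
  rw [pvCleanLoopA_eq_delta _ _ _ (by simp), List.singleton_append]
  rw [show ∀ t, pvDedupLoopA ([("role", "system"), ("content", SYSTEM_QYRA)] :: t) [] none
        = pvDedupLoopA t [[("role", "system"), ("content", SYSTEM_QYRA)]] (some "system")
      from fun t => by simp [pvDedupLoopA, pvRoleGetD]]
  exact pvDedup_delta_eq_fuse _ _ _ _
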